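-- pv_equiv track=rewrite | github.com/abellol/Proyecto_PDC | bifid_decoder.py | crear_matriz
-- ===== SOURCE A (Python) =====
-- def limpiar_cadena(string: str) -> str:
--   string.replace("j", "i")
--   caracteres_no_deseados = '!#$%&()/=?¿*+~¨^>}<@|°¬,. ;:-_[]{"0123456789' # cadena de caracteres no deseados
--   cadena_limpia = ''.join([char for char in string if char not in caracteres_no_deseados])
--   return cadena_limpia
--
-- def crear_matriz(key):
--
--     """
--     Esta función crea una matriz de acuerdo a una clave para cifrar usando esta matriz
--
--     Args:
--         La función utiliza un string key como argumento
--
--     Returns: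
--         La función retorna una matriz con el abecedario reorganizado
--     """
--
--     key.lower()
--     key=limpiar_cadena(key)
--     Abecedario=['a', 'b', 'c', 'd', 'e', 'f', 'g', 'h', 'i', 'k', 'l', 'm', 'n', 'o', 'p', 'q', 'r', 's', 't', 'u', 'v', 'w', 'x', 'y', 'z']
--     matriz=[]
--
--     for l in range(len(key)):
--         letra=key[l]
--         count=key.count(letra)
--         if count!=0:
--             for i in range(count):
--                 key=key.replace(letra, ".")
--             key = key[:l] + letra + key[l+1:]
--         if letra in Abecedario:
--             Abecedario.remove(letra)
--     key=key.replace(".", "")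
--
--
--     k=0
--     for f in range(5):
--         fila = [None] * 5
--         matriz.append(fila)
--     k = 0
--     for c in range(5):
--         for f in range(5):
--             if k < len(key):
--                 matriz[f][c] = key[k]
--                 k += 1
--             else:
--                 if Abecedario:
--                     matriz[f][c] = Abecedario[0]
--                     Abecedario.pop(0)
--     return matriz
-- ===== SOURCE B (Python) =====
-- def limpiar_cadena(string: str) -> str:
--   string.replace("j", "i")
--   caracteres_no_deseados = '!#$%&()/=?¿*+~¨^>}<@|°¬,. ;:-_[]{"0123456789' # cadena de caracteres no deseados
--   cadena_limpia = ''.join([char for char in string if char not in caracteres_no_deseados])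
--   return cadena_limpia
--
-- def crear_matriz(key):
--     key = limpiar_cadena(key)
--     dedup = list(dict.fromkeys(key))          # first occurrence of each char, in order
--     abecedario = "abcdefghiklmnopqrstuvwxyz"
--     seq = dedup + [c for c in abecedario if c not in dedup]
--     return [[seq[5 * c + f] for c in range(5)] for f in range(5)]
-- ===== Notes on version B (the rewrite author's own statement) =====
-- stated objective: faster
-- what changed: A's in-place dedup (repeatedly replacing every occurrence of the current char with '.' and re-inserting it, then stripping dots) and its stateful 25-cell nested fill loop (counter k switching from key to a popped alphabet list) are replaced by one ordered dedup via dict.fromkeys, a filtered leftover alphabet, and a single flat concatenation seq reshaped column-major by index arithmetic seq[5*c+f].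
import Mathlib
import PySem

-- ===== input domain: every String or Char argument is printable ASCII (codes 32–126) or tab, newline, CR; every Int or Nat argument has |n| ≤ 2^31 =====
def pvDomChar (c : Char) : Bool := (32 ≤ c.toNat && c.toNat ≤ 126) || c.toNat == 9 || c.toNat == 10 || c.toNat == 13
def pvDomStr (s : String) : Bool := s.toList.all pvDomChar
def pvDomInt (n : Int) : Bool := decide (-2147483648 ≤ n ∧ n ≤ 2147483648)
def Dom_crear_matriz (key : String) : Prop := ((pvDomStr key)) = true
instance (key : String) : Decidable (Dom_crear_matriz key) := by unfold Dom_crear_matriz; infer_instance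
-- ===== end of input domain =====

-- B re-decomposes A: ordered dedup (dict.fromkeys) plus the leftover alphabet are concatenated into
-- one flat sequence that is reshaped column-major by index arithmetic, replacing A's replace-with-dots
-- dedup loop and its stateful 25-cell fill loop (objective: faster, measured; the dead key.lower()/
-- replace("j","i") statements of the source are kept where the source has them).

-- ===== PORT A =====
-- limpiar_cadena, defined identically in Source A and Source B (both ports use it)
def pvBad : List Char := "!#$%&()/=?¿*+~¨^>}<@|°¬,. ;:-_[]{\"0123456789".toList

def pvLimpiar (s : List Char) : List Char :=
  -- string.replace("j", "i") is computed and its result DISCARDED, exactly as in the Python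
  let _ := PySem.Chars.replace s ['j'] ['i']
  -- ''.join([char for char in string if char not in caracteres_no_deseados])
  s.filter (fun c => !(PySem.Chars.isIn [c] pvBad))

def pvAbecedario : List Char :=
  ['a','b','c','d','e','f','g','h','i','k','l','m','n','o','p','q','r','s','t','u','v','w','x','y','z']

-- the dedup loop: for l in range(len(key)): …  (n = remaining iterations, l = current index;
-- key[l] via getD is exact since the loop body preserves len(key), so l stays in range)
def pvLoopA : Nat → Nat → List Char → List Char → List Char × List Char
  | 0, _, key, ab => (key, ab)
  | n+1, l, key, ab =>
    let letra := key.getD l ' '                         -- letra = key[l]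
    let count := PySem.Chars.count key [letra]          -- count = key.count(letra)
    let key1 :=
      if count ≠ 0 then
        -- for i in range(count): key = key.replace(letra, ".")
        let k2 := (List.range count).foldl (fun k _ => PySem.Chars.replace k [letra] ['.']) key
        -- key = key[:l] + letra + key[l+1:]
        PySem.List.slice k2 none (some (l : Int)) ++ [letra] ++ PySem.List.slice k2 (some ((l : Int) + 1)) none
      else key
    let ab1 := if letra ∈ ab then (PySem.List.remove? ab letra).getD ab else ab
    pvLoopA n (l+1) key1 ab1

-- matriz[f][c] = v
def pvCell (m : List (List (Option Char))) (f c : Nat) (v : Char) : List (List (Option Char)) :=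
  m.set f ((m.getD f []).set c (some v))

-- the body of one cell of the fill loop (state: matriz, k, Abecedario)
def pvFillStep (key : List Char) (st : List (List (Option Char)) × Nat × List Char)
    (fc : Nat × Nat) : List (List (Option Char)) × Nat × List Char :=
  let (m, k, ab) := st
  if k < key.length then (pvCell m fc.1 fc.2 (key.getD k ' '), k+1, ab)
  else match ab with
    | [] => (m, k, ab)
    | a :: rest => (pvCell m fc.1 fc.2 a, k, rest)

def crear_matriz (key : String) : List (List String) :=
  let _ := PySem.Chars.lower key.toList                 -- key.lower(), result discarded (as in the Python)
  let key1 := pvLimpiar key.toList                      -- key = limpiar_cadena(key)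
  let st := pvLoopA key1.length 0 key1 pvAbecedario     -- the dedup loop
  let key3 := PySem.Chars.replace st.1 ['.'] []         -- key = key.replace(".", "")
  -- for f in range(5): matriz.append([None]*5)
  let matriz0 := (List.range 5).foldl (fun (m : List (List (Option Char))) _ => m ++ [List.replicate 5 (none : Option Char)]) []
  -- k = 0; for c in range(5): for f in range(5): …
  let res := (List.range 5).foldl (fun s c => (List.range 5).foldl (fun s' f => pvFillStep key3 s' (f, c)) s) (matriz0, 0, st.2)
  -- the cells are always assigned (dedup key + leftover alphabet always hold ≥ 25 chars),
  -- so "" below only stands in for Python's unreachable None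
  res.1.map (fun row => row.map (fun o => match o with | some ch => String.ofList [ch] | none => ""))

-- ===== PORT B =====
def crear_matriz_alt (key : String) : List (List String) :=
  let k := pvLimpiar key.toList                         -- key = limpiar_cadena(key)
  let dedup := PySem.List.dedup k                       -- list(dict.fromkeys(key))
  let seq := dedup ++ pvAbecedario.filter (fun c => !(dedup.contains c))
  -- [[seq[5*c+f] for c in range(5)] for f in range(5)]  (always in range: len(seq) ≥ 25)
  (List.range 5).map (fun f => (List.range 5).map (fun c => String.ofList [seq.getD (5*c + f) ' ']))

-- ===== PRECONDITION & SPEC =====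
def Spec_crear_matriz (key : String) (out : List (List String)) : Prop := out = crear_matriz_alt key
instance (key : String) (out : List (List String)) : Decidable (Spec_crear_matriz key out) := by unfold Spec_crear_matriz; infer_instance

-- ===== CLAIM (what is proved, stated in full; the proofs are below) =====
def Claim_equal_crear_matriz : Prop := ∀ (key : String), Dom_crear_matriz key → Spec_crear_matriz key (crear_matriz key)

-- ===== LEMMAS AND PROOFS =====

-- key with first occurrences kept and later duplicates replaced by '.' (seen = chars already passed)
def pvMark (seen : List Char) : List Char → List Char
  | [] => []
  | c :: t => (if seen.contains c then '.' else c) :: pvMark (c :: seen) t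

-- the 25 (f, c) cell coordinates of A's fill loop, in visit order (c outer, f inner)
def pvCells : List (Nat × Nat) :=
  [(0,0),(1,0),(2,0),(3,0),(4,0),(0,1),(1,1),(2,1),(3,1),(4,1),(0,2),(1,2),(2,2),(3,2),(4,2),
   (0,3),(1,3),(2,3),(3,3),(4,3),(0,4),(1,4),(2,4),(3,4),(4,4)]

theorem go_single (a : Char) (new : List Char) (l : List Char) (fuel : Nat) (acc : List Char)
    (h : l.length ≤ fuel) :
    PySem.Chars.replace.go [a] new fuel l acc
      = acc.reverse ++ l.flatMap (fun c => if c = a then new else [c]) := by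
  induction l generalizing fuel acc with
  | nil => cases fuel <;> simp [PySem.Chars.replace.go]
  | cons c t ih =>
    cases fuel with
    | zero => simp at h
    | succ f =>
      rw [PySem.Chars.replace.go]
      by_cases hc : c = a
      · subst hc
        simp only [List.isPrefixOf, BEq.rfl, Bool.true_and, if_pos, List.length_cons,
          List.length_nil, List.drop_succ_cons, List.drop_zero]
        rw [ih _ _ (by simpa using h)]
        simp
      · have : [a].isPrefixOf (c :: t) = false := by
          simp [List.isPrefixOf]
          exact fun hh => absurd hh.symm hc
        rw [this]
        simp only [Bool.false_eq_true, if_false]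
        rw [ih _ _ (by simpa using h)]
        simp [hc]

theorem pv_replace_single (s : List Char) (a : Char) (new : List Char) :
    PySem.Chars.replace s [a] new = s.flatMap (fun c => if c = a then new else [c]) := by
  rw [PySem.Chars.replace]
  simp [go_single a new s s.length [] le_rfl]

theorem count_go_single (a : Char) (l : List Char) (fuel : Nat) (acc : Nat)
    (h : l.length ≤ fuel) :
    PySem.Chars.count.go [a] fuel l acc = acc + l.count a := by
  induction l generalizing fuel acc with
  | nil => cases fuel <;> simp [PySem.Chars.count.go]
  | cons c t ih =>
    cases fuel with
    | zero => simp at h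
    | succ f =>
      rw [PySem.Chars.count.go]
      by_cases hc : c = a
      · subst hc
        simp only [List.isPrefixOf, BEq.rfl, Bool.true_and, if_pos, List.length_cons,
          List.length_nil, List.drop_succ_cons, List.drop_zero]
        rw [ih _ _ (by simpa using h)]
        simp [List.count_cons]
        omega
      · have : [a].isPrefixOf (c :: t) = false := by
          simp [List.isPrefixOf]
          exact fun hh => absurd hh.symm hc
        rw [this]
        simp only [Bool.false_eq_true, if_false]
        rw [ih _ _ (by simpa using h)]
        simp [List.count_cons, hc]

theorem pv_count_single (s : List Char) (a : Char) :
    PySem.Chars.count s [a] = s.count a := by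
  rw [PySem.Chars.count]
  simp [count_go_single a s s.length 0 le_rfl]


theorem pv_replace_self (s : List Char) (a : Char) :
    PySem.Chars.replace s [a] [a] = s := by
  rw [pv_replace_single]
  induction s with
  | nil => rfl
  | cons c t ih => by_cases h : c = a <;> simp [h, ih]

theorem pv_replace_map (s : List Char) (a b : Char) :
    PySem.Chars.replace s [a] [b] = s.map (fun x => if x = a then b else x) := by
  rw [pv_replace_single]
  induction s with
  | nil => rfl
  | cons c t ih => by_cases h : c = a <;> simp [h, ih]

theorem pv_replace_del (s : List Char) (a : Char) :
    PySem.Chars.replace s [a] [] = s.filter (fun x => x ≠ a) := by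
  rw [pv_replace_single]
  induction s with
  | nil => rfl
  | cons c t ih => by_cases h : c = a <;> simp [h, ih]

theorem pv_foldl_idem {α : Type} (g : α → α) (x : α) (hg : g (g x) = g x) (n : Nat) (hn : n ≠ 0) :
    (List.range n).foldl (fun k _ => g k) x = g x := by
  induction n with
  | zero => omega
  | succ m ih =>
    rw [List.range_succ, List.foldl_append]
    cases m with
    | zero => simp
    | succ m' => rw [ih (by omega)]; simpa using hg

theorem pvMark_length (seen s : List Char) : (pvMark seen s).length = s.length := by
  induction s generalizing seen with
  | nil => rfl
  | cons c t ih => simp [pvMark, ih]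

theorem pvMark_congr (seen seen' s : List Char) (h : ∀ x, seen.contains x = seen'.contains x) :
    pvMark seen s = pvMark seen' s := by
  induction s generalizing seen seen' with
  | nil => rfl
  | cons c t ih =>
    simp only [pvMark, h c]
    rw [ih (c :: seen) (c :: seen') (fun x => by simp only [List.contains_cons, h x])]

theorem pvMark_append (seen p q : List Char) :
    pvMark seen (p ++ q) = pvMark seen p ++ pvMark (p.reverse ++ seen) q := by
  induction p generalizing seen with
  | nil => rfl
  | cons c t ih =>
    simp only [List.cons_append, pvMark, ih (c :: seen), List.reverse_cons]
    rw [pvMark_congr (t.reverse ++ c :: seen) ((t.reverse ++ [c]) ++ seen) q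
      (fun x => by simp only [List.contains_append, List.contains_cons]; cases hx1 : t.reverse.contains x <;> simp)]

theorem pvMark_mem (seen s : List Char) (x : Char) (hx : x ∈ pvMark seen s) :
    x = '.' ∨ x ∈ s := by
  induction s generalizing seen with
  | nil => simp [pvMark] at hx
  | cons c t ih =>
    simp only [pvMark, List.mem_cons] at hx
    rcases hx with h | h
    · by_cases hc : (seen.contains c : Bool) = true
      · rw [if_pos hc] at h; left; exact h
      · rw [if_neg hc] at h; right; simp [h]
    · rcases ih _ h with h' | h' <;> simp [h']

-- (pvMark seen s) with the dots dropped is exactly the seen-aware ordered dedup (set-fold) of s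
theorem pv_dedup_mark (s acc seen : List Char) (hs : '.' ∉ s)
    (h : ∀ x, acc.contains x = seen.contains x) :
    s.foldl PySem.Set.add acc = acc ++ (pvMark seen s).filter (fun x => x ≠ '.') := by
  induction s generalizing acc seen with
  | nil => simp [pvMark]
  | cons c t ih =>
    have hc : c ≠ '.' := fun hh => hs (hh ▸ List.mem_cons_self)
    have ht : '.' ∉ t := fun hh => hs (List.mem_cons_of_mem _ hh)
    have hac : PySem.Set.contains acc c = seen.contains c := h c
    simp only [List.foldl_cons, pvMark, PySem.Set.add, hac]
    by_cases hseen : (seen.contains c : Bool) = true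
    · rw [if_pos hseen, if_pos hseen]
      rw [ih acc (c :: seen) ht (fun x => by
        simp only [List.contains_cons, h x]
        by_cases hxc : x = c
        · subst hxc; simp at hseen; simp [hseen]
        · simp [hxc])]
      simp
    · rw [if_neg hseen, if_neg hseen]
      rw [ih (acc ++ [c]) (c :: seen) ht (fun x => by
        simp only [List.contains_append, List.contains_cons, h x, List.contains_nil]
        cases hh : (seen.contains x : Bool) <;> simp [Bool.or_comm])]
      simp [hc]

theorem pv_getD_append_mid (xs ys : List Char) (y : Char) (d : Char) :
    (xs ++ y :: ys).getD xs.length d = y := by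
  induction xs with
  | nil => rfl
  | cons a t ih => simpa using ih

theorem pv_remove_mem {α : Type} [BEq α] [LawfulBEq α] (xs : List α) (v : α) (hv : v ∈ xs) (d : List α) :
    (PySem.List.remove? xs v).getD d = xs.erase v := by
  induction xs with
  | nil => simp at hv
  | cons a t ih =>
    by_cases ha : a = v
    · subst ha
      simp [PySem.List.remove?, List.idxOf?_cons]
    · have hvt : v ∈ t := by
        rcases List.mem_cons.mp hv with h | h
        · exact absurd h.symm ha
        · exact h
      obtain ⟨i, hi⟩ := Option.isSome_iff_exists.mp (List.isSome_idxOf?.mpr hvt)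
      have := ih hvt
      simp only [PySem.List.remove?, hi, Option.map_some, Option.getD_some] at this
      simp [PySem.List.remove?, List.idxOf?_cons, (by simp [ha] : (a == v) = false), hi,
        List.erase_cons, this]


theorem pv_loop_inv (s ab₀ : List Char) (hdot : '.' ∉ s) (hnd : ab₀.Nodup) (habdot : '.' ∉ ab₀) :
    ∀ n l, l + n = s.length →
    pvLoopA n l (pvMark [] (s.take l) ++ (s.drop l).map (fun x => if (s.take l).contains x then '.' else x))
        (ab₀.filter (fun a => !((s.take l).contains a)))
      = (pvMark [] s, ab₀.filter (fun a => !(s.contains a))) := by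
  intro n
  induction n with
  | zero =>
    intro l hl
    simp only [Nat.add_zero] at hl
    rw [pvLoopA]
    rw [hl, List.take_length, List.drop_length]
    simp
  | succ n ih =>
    intro l hl
    have hllt : l < s.length := by omega
    set c := s[l] with hc
    have htake : s.take (l+1) = s.take l ++ [c] := by
      rw [List.take_succ]; simp [hc, List.getElem?_eq_getElem hllt]
    have hdrop : s.drop l = c :: s.drop (l+1) := List.drop_eq_getElem_cons hllt
    have hcmem : c ∈ s := List.getElem_mem hllt
    have hcdot : c ≠ '.' := fun hh => hdot (hh ▸ hcmem)
    set P := pvMark [] (s.take l) with hP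
    have hPlen : P.length = l := by
      rw [hP, pvMark_length, List.length_take]; omega
    set g : Char → Char := fun x => if (s.take l).contains x then '.' else x with hg
    set g' : Char → Char := fun x => if (s.take (l+1)).contains x then '.' else x with hg'
    have hK : (s.drop l).map g = g c :: (s.drop (l+1)).map g := by rw [hdrop]; simp
    rw [pvLoopA]
    have hletra : (P ++ (s.drop l).map g).getD l ' ' = g c := by
      rw [hK, ← hPlen, pv_getD_append_mid]
    simp only [hletra]
    by_cases hmem : c ∈ s.take l
    -- CASE A: key[l] is already a dot
    · have hmemb : (s.take l).contains c = true := by simpa using hmem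
      have hgc : g c = '.' := by simp only [hg, hmemb]; simp
      rw [hgc]
      have hcount : PySem.Chars.count (P ++ (s.drop l).map g) ['.'] ≠ 0 := by
        rw [pv_count_single]
        have hin : '.' ∈ P ++ (s.drop l).map g := by
          rw [hK, hgc]; exact List.mem_append_right _ List.mem_cons_self
        have := List.count_pos_iff.mpr hin
        omega
      rw [if_pos hcount]
      have hfold : (List.range (PySem.Chars.count (P ++ (s.drop l).map g) ['.'])).foldl
          (fun k _ => PySem.Chars.replace k ['.'] ['.']) (P ++ (s.drop l).map g) = P ++ (s.drop l).map g := by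
        rw [pv_foldl_idem _ _ (by rw [pv_replace_self, pv_replace_self]) _ hcount, pv_replace_self]
      rw [hfold]
      have hsl1 : PySem.List.slice (P ++ (s.drop l).map g) none (some (l : Int)) = P := by
        rw [PySem.List.slice_to_natCast, ← hPlen, List.take_left]
      have hsl2 : PySem.List.slice (P ++ (s.drop l).map g) (some ((l : Int) + 1)) none
          = (s.drop (l+1)).map g := by
        have h1 : ((l : Int) + 1) = ((l + 1 : Nat) : Int) := by push_cast; ring
        rw [h1, PySem.List.slice_from_natCast, hK]
        rw [(by omega : l + 1 = P.length + 1)]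
        simp [List.drop_append]
      rw [hsl1, hsl2]
      have habdot' : ('.' : Char) ∉ ab₀.filter (fun a => !((s.take l).contains a)) := by
        intro hh; exact habdot (List.mem_of_mem_filter hh)
      rw [if_neg habdot']
      have hgg' : g' = g := by
        funext x
        by_cases hx : x = c
        · subst hx; simp [hg, hg', htake, hmem]
        · simp [hg, hg', htake, hx]
      have hmark1 : pvMark [] (s.take (l+1)) = P ++ ['.'] := by
        rw [htake, pvMark_append, hP]
        congr 1
        simp only [pvMark, List.append_nil]
        rw [if_pos (by simpa using hmem)]
      have hfilt : ab₀.filter (fun a => !((s.take l).contains a))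
          = ab₀.filter (fun a => !((s.take (l+1)).contains a)) := by
        apply List.filter_congr
        intro a _
        by_cases hx : a = c
        · subst hx; simp [htake, hmem]
        · simp [htake, hx]
      rw [hfilt]
      rw [show P ++ ['.'] ++ (s.drop (l+1)).map g
            = pvMark [] (s.take (l+1)) ++ (s.drop (l+1)).map g' by rw [hmark1, hgg']]
      exact ih (l+1) (by omega)
    -- CASE B: key[l] is the first occurrence of c
    · have hmemb : (s.take l).contains c = false := by simpa using hmem
      have hgc : g c = c := by simp only [hg, hmemb]; simp
      rw [hgc]
      have hcP : c ∉ P := by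
        intro hcc
        rcases pvMark_mem _ _ _ hcc with h | h
        · exact hcdot h
        · exact hmem h
      have hcount : PySem.Chars.count (P ++ (s.drop l).map g) [c] ≠ 0 := by
        rw [pv_count_single]
        have hin : c ∈ P ++ (s.drop l).map g := by
          rw [hK, hgc]; exact List.mem_append_right _ List.mem_cons_self
        have := List.count_pos_iff.mpr hin
        omega
      rw [if_pos hcount]
      set sb : Char → Char := fun x => if x = c then '.' else x with hsb
      have hrep : ∀ k : List Char, PySem.Chars.replace k [c] ['.'] = k.map sb :=
        fun k => pv_replace_map k c '.'
      have hidem : PySem.Chars.replace (PySem.Chars.replace (P ++ (s.drop l).map g) [c] ['.']) [c] ['.']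
          = PySem.Chars.replace (P ++ (s.drop l).map g) [c] ['.'] := by
        rw [hrep, hrep, List.map_map]
        apply List.map_congr_left
        intro x _
        simp only [Function.comp_apply, hsb]
        by_cases hx : x = c
        · simp [hx, (show ('.' : Char) ≠ c from fun hh => hcdot hh.symm)]
        · simp [hx]
      have hfold : (List.range (PySem.Chars.count (P ++ (s.drop l).map g) [c])).foldl
          (fun k _ => PySem.Chars.replace k [c] ['.']) (P ++ (s.drop l).map g)
          = (P ++ (s.drop l).map g).map sb := by
        rw [pv_foldl_idem _ _ hidem _ hcount, hrep]
      rw [hfold]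
      have hmapP : P.map sb = P := by
        have h1 : P.map sb = P.map id := List.map_congr_left (fun x hx => by
          have hxc : x ≠ c := fun hh => hcP (hh ▸ hx)
          simp [hsb, hxc])
        simpa using h1
      have hcomp : ∀ x, sb (g x) = g' x := by
        intro x
        by_cases hx1 : x ∈ s.take l
        · have h2 : x ∈ s.take (l+1) := by rw [htake]; exact List.mem_append_left _ hx1
          simp [hg, hg', hsb, hx1, h2, (show ('.' : Char) ≠ c from fun hh => hcdot hh.symm)]
        · by_cases hx2 : x = c
          · subst hx2
            simp [hg, hg', hsb, hx1, htake]
          · have h2 : x ∉ s.take (l+1) := by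
              rw [htake]; simp [hx1, hx2]
            simp [hg, hg', hsb, hx1, hx2, h2]
      have hmap : (P ++ (s.drop l).map g).map sb = P ++ ('.' :: (s.drop (l+1)).map g') := by
        rw [List.map_append, hmapP, hK, List.map_cons, List.map_map]
        congr 2
        · rw [hgc]; simp [hsb]
        · exact List.map_congr_left (fun x _ => hcomp x)
      rw [hmap]
      have hsl1 : PySem.List.slice (P ++ ('.' :: (s.drop (l+1)).map g')) none (some (l : Int)) = P := by
        rw [PySem.List.slice_to_natCast, ← hPlen, List.take_left]
      have hsl2 : PySem.List.slice (P ++ ('.' :: (s.drop (l+1)).map g')) (some ((l : Int) + 1)) none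
          = (s.drop (l+1)).map g' := by
        have h1 : ((l : Int) + 1) = ((l + 1 : Nat) : Int) := by push_cast; ring
        rw [h1, PySem.List.slice_from_natCast]
        rw [(by omega : l + 1 = P.length + 1)]
        simp [List.drop_append]
      rw [hsl1, hsl2]
      have hmark1 : pvMark [] (s.take (l+1)) = P ++ [c] := by
        rw [htake, pvMark_append, hP]
        congr 1
        simp only [pvMark, List.append_nil]
        rw [if_neg (by simpa using hmem)]
      have hab : (if c ∈ ab₀.filter (fun a => !((s.take l).contains a))
            then (PySem.List.remove? (ab₀.filter (fun a => !((s.take l).contains a))) c).getD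
              (ab₀.filter (fun a => !((s.take l).contains a)))
            else ab₀.filter (fun a => !((s.take l).contains a)))
          = ab₀.filter (fun a => !((s.take (l+1)).contains a)) := by
        by_cases hcab : c ∈ ab₀
        · have hcmemf : c ∈ ab₀.filter (fun a => !((s.take l).contains a)) :=
            List.mem_filter.mpr ⟨hcab, by simp only [hmemb]; rfl⟩
          rw [if_pos hcmemf, pv_remove_mem _ _ hcmemf]
          rw [List.Nodup.erase_eq_filter (hnd.filter _) c, List.filter_filter]
          apply List.filter_congr
          intro a _
          by_cases hx : a = c
          · subst hx; simp [htake]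
          · simp [htake, hx]
        · have hcnot : c ∉ ab₀.filter (fun a => !((s.take l).contains a)) := by
            intro hh; exact hcab (List.mem_of_mem_filter hh)
          rw [if_neg hcnot]
          apply List.filter_congr
          intro a ha
          have hx : a ≠ c := fun hh => hcab (hh ▸ ha)
          simp [htake, hx]
      rw [hab]
      rw [show P ++ [c] ++ (s.drop (l+1)).map g'
            = pvMark [] (s.take (l+1)) ++ (s.drop (l+1)).map g' by rw [hmark1]]
      exact ih (l+1) (by omega)



theorem pv_fill_step (key ab : List Char) (m : List (List (Option Char))) (t : Nat) (fc : Nat × Nat)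
    (ht : t < key.length + ab.length) :
    pvFillStep key (m, min t key.length, (key ++ ab).drop (max t key.length)) fc
      = (pvCell m fc.1 fc.2 ((key ++ ab).getD t ' '), min (t+1) key.length,
          (key ++ ab).drop (max (t+1) key.length)) := by
  by_cases hk : t < key.length
  · simp only [pvFillStep]
    simp only [Nat.min_eq_left (Nat.le_of_lt hk), if_pos hk]
    have h1 : (key ++ ab).getD t ' ' = key.getD t ' ' := by
      unfold List.getD
      rw [List.getElem?_append_left hk]
    rw [h1, Nat.max_eq_right (Nat.le_of_lt hk), Nat.max_eq_right hk, Nat.min_eq_left (by omega : t + 1 ≤ key.length)]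
  · have hk' : key.length ≤ t := Nat.le_of_not_lt hk
    have hlen : t < (key ++ ab).length := by simp; omega
    have hd : (key ++ ab).drop (max t key.length)
        = (key ++ ab).getD t ' ' :: (key ++ ab).drop (t+1) := by
      rw [Nat.max_eq_left hk']
      rw [List.drop_eq_getElem_cons hlen]
      congr 1
      unfold List.getD
      rw [List.getElem?_eq_getElem hlen]
      rfl
    simp only [pvFillStep]
    simp only [Nat.min_eq_right hk', if_neg hk, hd]
    rw [if_neg (Nat.lt_irrefl _), Nat.min_eq_right (by omega : key.length ≤ t + 1), Nat.max_eq_left (by omega : key.length ≤ t + 1)]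

theorem pv_fill_gen (key ab : List Char) (cells : List (Nat × Nat)) :
    ∀ (t : Nat) (m : List (List (Option Char))), t + cells.length ≤ key.length + ab.length →
    cells.foldl (pvFillStep key) (m, min t key.length, (key ++ ab).drop (max t key.length))
      = ((cells.zipIdx t).foldl (fun mm (p : (Nat × Nat) × Nat) => pvCell mm p.1.1 p.1.2 ((key ++ ab).getD p.2 ' ')) m,
         min (t + cells.length) key.length, (key ++ ab).drop (max (t + cells.length) key.length)) := by
  induction cells with
  | nil => intro t m ht; simp
  | cons fc cs ih =>
    intro t m ht
    rw [List.foldl_cons, pv_fill_step key ab m t fc (by simp at ht; omega)]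
    rw [ih (t+1) _ (by simp at ht ⊢; omega)]
    simp only [List.zipIdx_cons, List.foldl_cons, List.length_cons,
      (by omega : t + 1 + cs.length = t + (cs.length + 1))]


-- '.' is one of the characters limpiar_cadena removes
theorem pv_limpiar_no_dot (t : List Char) : '.' ∉ pvLimpiar t := by
  intro h
  have := List.of_mem_filter h
  simp only [(by decide : PySem.Chars.isIn ['.'] pvBad = true)] at this
  exact absurd this (by decide)

-- dedup key plus the leftover alphabet always supply at least the 25 cells
theorem pv_size (s : List Char) :
    25 ≤ (PySem.List.dedup s).length + (pvAbecedario.filter (fun a => !(s.contains a))).length := by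
  have hsplit := List.length_eq_length_filter_add (l := pvAbecedario) (fun a => s.contains a)
  have hlen : pvAbecedario.length = 25 := by decide
  have hsub : pvAbecedario.filter (fun a => s.contains a) ⊆ PySem.List.dedup s := by
    intro a ha
    exact (PySem.List.mem_dedup s a).mpr (by simpa using List.of_mem_filter ha)
  have hnd : (pvAbecedario.filter (fun a => s.contains a)).Nodup :=
    List.Nodup.filter _ (by decide)
  have hle : (pvAbecedario.filter (fun a => s.contains a)).length ≤ (PySem.List.dedup s).length :=
    calc (pvAbecedario.filter (fun a => s.contains a)).length
        = (pvAbecedario.filter (fun a => s.contains a)).toFinset.card := (List.toFinset_card_of_nodup hnd).symm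
      _ ≤ (PySem.List.dedup s).toFinset.card :=
          Finset.card_le_card (fun x hx => List.mem_toFinset.mpr (hsub (List.mem_toFinset.mp hx)))
      _ ≤ (PySem.List.dedup s).length := List.toFinset_card_le _
  omega

-- ===== VERDICT (by name: the statement is the Claim_ definition above) =====
set_option maxHeartbeats 1000000 in
theorem crear_matriz_spec : Claim_equal_crear_matriz := by
  intro key _
  unfold Spec_crear_matriz
  simp only [crear_matriz, crear_matriz_alt]
  set s := pvLimpiar key.toList with hs
  have hdot : '.' ∉ s := pv_limpiar_no_dot key.toList
  -- the dedup loop computes the dot-marked key and the reduced alphabet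
  have hloop : pvLoopA s.length 0 s pvAbecedario
      = (pvMark [] s, pvAbecedario.filter (fun a => !(s.contains a))) := by
    have h0 := pv_loop_inv s pvAbecedario hdot (by decide) (by decide) s.length 0 (by omega)
    simpa using h0
  rw [hloop]
  -- removing the dots leaves the ordered dedup of the cleaned key
  have hkey3 : PySem.Chars.replace (pvMark [] s) ['.'] [] = PySem.List.dedup s := by
    rw [pv_replace_del]
    have h1 := pv_dedup_mark s [] [] hdot (fun x => rfl)
    simp only [List.nil_append] at h1
    rw [PySem.List.dedup, PySem.Set.ofList]
    exact h1.symm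
  rw [hkey3]
  -- B's leftover-alphabet filter agrees with A's
  have habf : pvAbecedario.filter (fun c => !((PySem.List.dedup s).contains c))
      = pvAbecedario.filter (fun a => !(s.contains a)) := by
    apply List.filter_congr
    intro a _
    by_cases h : a ∈ s
    · simp [h, (PySem.List.mem_dedup s a).mpr h]
    · simp [h, fun hh => h ((PySem.List.mem_dedup s a).mp hh)]
  rw [habf]
  set dk := PySem.List.dedup s with hdk
  set abf := pvAbecedario.filter (fun a => !(s.contains a)) with habfd
  have hsz : 25 ≤ dk.length + abf.length := by
    have := pv_size s; rw [← hdk, ← habfd] at this; simpa using this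
  clear_value dk abf s
  have hr : List.range 5 = [0,1,2,3,4] := by decide
  -- the nested fill loop, flattened to its 25 cells
  have hnest : (List.range 5).foldl
        (fun st c => (List.range 5).foldl (fun st' f => pvFillStep dk st' (f, c)) st)
        ((List.range 5).foldl (fun (m : List (List (Option Char))) _ => m ++ [List.replicate 5 (none : Option Char)]) [], 0, abf)
      = pvCells.foldl (pvFillStep dk)
        (List.replicate 5 (List.replicate 5 (none : Option Char)), min 0 dk.length, (dk ++ abf).drop (max 0 dk.length)) := by
    rw [Nat.zero_min, Nat.zero_max, List.drop_left]
    simp only [hr, pvCells, List.foldl_cons, List.foldl_nil, List.replicate, List.nil_append,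
      List.singleton_append, List.cons_append, List.append_nil]
  rw [hnest, pv_fill_gen dk abf pvCells 0
    (List.replicate 5 (List.replicate 5 (none : Option Char))) (by simpa using hsz)]
  -- evaluate the 25 literal cell writes and compare with B's reshape
  simp only [hr, pvCells, List.zipIdx_cons, List.zipIdx_nil, List.foldl_cons, List.foldl_nil,
    List.map_cons, List.map_nil, pvCell, List.replicate, List.set_cons_zero, List.set_cons_succ,
    List.getD_cons_zero, List.getD_cons_succ]
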